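-- pv_equiv track=rewrite | github.com/Atomnp/cryptopals | set1/challenge5.py | xor_text_with_key
-- ===== SOURCE A (Python) =====
-- def xor_text_with_key(text, key):
--     # createing key of length equal  to the length of the text
--     complete_key = key*int(len(text)/len(key))
--     if len(complete_key) != len(text):
--         complete_key += key[:(len(text) % len(key))]
--     test = text.encode()
--     final = ""
--     for x, y in zip(text, complete_key):
--         a = hex(ord(x) ^ ord(y))[2:]
--         if len(a) == 1:
--             a = '0'+a
--         final += a
--     return final
-- ===== SOURCE B (Python) =====
-- _HEX = "0123456789abcdef"
--
-- def xor_text_with_key(text, key):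
--     # Process the text in key-sized blocks: each block is XORed against the
--     # whole key directly (no repeated-key string, no per-character modulo),
--     # and each byte is hex-formatted via a nibble lookup table.
--     out = []
--     rest = text
--     while rest:
--         block, rest = rest[:len(key)], rest[len(key):]
--         out.append("".join(_HEX[(ord(c) ^ ord(k)) >> 4] + _HEX[(ord(c) ^ ord(k)) & 15]
--                            for c, k in zip(block, key)))
--     return "".join(out)
-- ===== Notes on version B (the rewrite author's own statement) =====
-- stated objective: alternative
-- what changed: A materialises a full-length repeated key (string multiplication plus a remainder slice) and zips it character-by-character with the text, padding hex() output by hand; B instead consumes the text in key-sized blocks, XORing each block against the key itself, and converts each byte with a 16-entry nibble lookup table instead of hex()/padding.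
-- outside the precondition, e.g. on xor_text_with_key('ab', ''): A raises ZeroDivisionError, B does not finish within the time limit
import Mathlib
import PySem

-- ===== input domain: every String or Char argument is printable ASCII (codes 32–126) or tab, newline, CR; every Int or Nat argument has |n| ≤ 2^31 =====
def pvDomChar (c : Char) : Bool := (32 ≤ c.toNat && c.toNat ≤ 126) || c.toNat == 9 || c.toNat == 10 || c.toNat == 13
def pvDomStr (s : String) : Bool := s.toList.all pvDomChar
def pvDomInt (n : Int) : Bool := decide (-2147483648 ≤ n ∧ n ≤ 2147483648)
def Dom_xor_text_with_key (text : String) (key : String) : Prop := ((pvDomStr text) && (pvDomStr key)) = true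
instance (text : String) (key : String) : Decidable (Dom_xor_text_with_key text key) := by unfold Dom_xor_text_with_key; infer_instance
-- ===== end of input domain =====

-- B replaces A's materialised repeated-key-string + per-character zip by block-wise
-- processing (key-sized slices XORed against the key itself) with a nibble lookup
-- table instead of hex()/padding; same O(len(text)) cost (objective: alternative).

-- ===== PORT A =====
-- the loop body 'a = hex(ord(x) ^ ord(y))[2:]; if len(a) == 1: a = '0'+a'
-- (Nat.toDigits 16 v is exactly hex(v)[2:] for v ≥ 0: lowercase digits, "0" for 0)
def pvFmtA (p : Char × Char) : List Char :=
  let a := Nat.toDigits 16 (p.1.toNat ^^^ p.2.toNat)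
  if a.length = 1 then '0' :: a else a

def xor_text_with_key (text : String) (key : String) : String :=
  let tl := text.toList
  let kl := key.toList
  -- complete_key = key * int(len(text)/len(key))
  -- (int(len(text)/len(key)) is floor division of two nonnegative lengths; key = ''
  --  raises ZeroDivisionError in Python and is excluded by Pre_ below)
  let ck0 := (List.replicate (tl.length / kl.length) kl).flatten
  -- if len(complete_key) != len(text): complete_key += key[:(len(text) % len(key))]
  -- (the slice key[0:r] with 0 ≤ r is exactly List.take r)
  let ck := if ck0.length ≠ tl.length then ck0 ++ kl.take (tl.length % kl.length) else ck0
  -- `test = text.encode()` in A is dead (never used) and has no effect; not ported.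
  -- for x, y in zip(text, complete_key): final += pvFmtA (x, y)
  String.mk ((tl.zip ck).foldl (fun (acc : List Char) (p : Char × Char) => acc ++ pvFmtA p) [])

-- ===== PORT B =====
-- _HEX = "0123456789abcdef"
def pvHexDigits : List Char := "0123456789abcdef".toList

-- the loop body's "".join(_HEX[(ord c ^ ord k) >> 4] + _HEX[(ord c ^ ord k) & 15] for c, k in zip(block, key))
-- (_HEX[i] is always in range since the XOR of two ASCII codes is < 256, so the pyGetD default is unreachable)
def pvHexBlock (block : List Char) (kl : List Char) : List Char :=
  PySem.Chars.join [] ((block.zip kl).map (fun p =>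
    [PySem.List.pyGetD pvHexDigits (((p.1.toNat ^^^ p.2.toNat) >>> 4 : Nat) : Int) ' ',
     PySem.List.pyGetD pvHexDigits (((p.1.toNat ^^^ p.2.toNat) &&& 15 : Nat) : Int) ' ']))

-- while rest: block, rest = rest[:len(key)], rest[len(key):]; out.append(…)
-- (slices with nonnegative bounds are take/drop; fuel = initial text length bounds the
--  loop — with key ≠ '' each iteration strictly shortens rest, so fuel never runs out;
--  with key = '' the Python loop diverges, outside Pre_)
def pvAltGo (kl : List Char) : Nat → List Char → List (List Char)
  | _, [] => []
  | 0, _ :: _ => []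
  | fuel + 1, c :: rest =>
      pvHexBlock ((c :: rest).take kl.length) kl :: pvAltGo kl fuel ((c :: rest).drop kl.length)

def xor_text_with_key_alt (text : String) (key : String) : String :=
  -- return "".join(out)
  String.mk (PySem.Chars.join [] (pvAltGo key.toList text.toList.length text.toList))

-- ===== PRECONDITION & SPEC =====
-- Pre_ excludes exactly key = '', on which A always raises ZeroDivisionError (and B's while loop never terminates).
def Pre_xor_text_with_key (text : String) (key : String) : Prop := key.toList ≠ []
instance (text : String) (key : String) : Decidable (Pre_xor_text_with_key text key) := by
  unfold Pre_xor_text_with_key; infer_instance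

def pvWitness_xor_text_with_key : String × String := ("abc", "key")

def Spec_xor_text_with_key (text : String) (key : String) (out : String) : Prop := out = xor_text_with_key_alt text key
instance (text : String) (key : String) (out : String) : Decidable (Spec_xor_text_with_key text key out) := by
  unfold Spec_xor_text_with_key; infer_instance

-- ===== CLAIM (what is proved, stated in full; the proofs are below) =====
def Claim_equal_xor_text_with_key : Prop := ∀ (text : String) (key : String), Dom_xor_text_with_key text key → Pre_xor_text_with_key text key → Spec_xor_text_with_key text key (xor_text_with_key text key)

-- ===== LEMMAS AND PROOFS =====

-- ''.join on the char-list side is flatten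
theorem pv_join_nil_flatten (l : List (List Char)) : PySem.Chars.join [] l = l.flatten := by
  induction l with
  | nil => simp [PySem.Chars.join, List.intercalate]
  | cons x xs ih =>
    cases xs with
    | nil => simp [PySem.Chars.join, List.intercalate]
    | cons y ys =>
      rw [PySem.Chars.join_cons_cons]
      simp only [List.flatten_cons]
      rw [ih]
      simp

-- the padded complete key A builds (the if in A always collapses to this)
def pvCK (kl tl : List Char) : List Char :=
  (List.replicate (tl.length / kl.length) kl).flatten ++ kl.take (tl.length % kl.length)

-- for any byte < 256, A's padded hex() equals B's two nibble-table lookups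
set_option maxRecDepth 40000 in
theorem pv_fmt_eq (v : Nat) (hv : v < 256) :
    (let a := Nat.toDigits 16 v; if a.length = 1 then '0' :: a else a)
    = [pvHexDigits.getD (v >>> 4) ' ', pvHexDigits.getD (v &&& 15) ' '] := by
  revert hv; revert v; decide

theorem pv_dom_lt (c : Char) (h : pvDomChar c = true) : c.toNat < 128 := by
  simp [pvDomChar] at h; omega

-- A's complete key splits off one full key copy while the text is at least key-sized
theorem pv_ck_step (kl tl : List Char) (hn : 0 < kl.length) (h : kl.length ≤ tl.length) :
    pvCK kl tl = kl ++ pvCK kl (tl.drop kl.length) := by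
  unfold pvCK
  rw [List.length_drop, Nat.div_eq_sub_div hn h, Nat.mod_eq_sub_mod h]
  simp [List.replicate_succ, List.append_assoc]

-- zipping with the complete key splits into a key-sized block plus the rest
theorem pv_zip_take (tl kl : List Char) : tl.zip (kl.take tl.length) = tl.zip kl := by
  apply List.ext_getElem
  · simp only [List.length_zip, List.length_take]
    omega
  · intro i h1 h2
    simp only [List.getElem_zip, List.getElem_take]

theorem pv_zip_split (kl tl : List Char) (hn : 0 < kl.length) :
    tl.zip (pvCK kl tl)
      = (tl.take kl.length).zip kl ++ (tl.drop kl.length).zip (pvCK kl (tl.drop kl.length)) := by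
  by_cases h : kl.length ≤ tl.length
  · rw [pv_ck_step kl tl hn h]
    have hz := List.zip_append (l₁ := tl.take kl.length) (l₂ := kl)
      (r₁ := tl.drop kl.length) (r₂ := pvCK kl (tl.drop kl.length)) (by simp [h])
    rw [List.take_append_drop] at hz
    exact hz
  · push_neg at h
    have hd : tl.drop kl.length = [] := List.drop_eq_nil_of_le (le_of_lt h)
    have ht : tl.take kl.length = tl := List.take_of_length_le (le_of_lt h)
    rw [hd, ht]
    unfold pvCK
    rw [Nat.div_eq_of_lt h, Nat.mod_eq_of_lt h]
    simp only [List.replicate_zero, List.flatten_nil, List.nil_append, List.zip_nil_left,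
      List.append_nil]
    exact pv_zip_take tl kl

-- one block of A's formatting is B's pvHexBlock (on Dom characters)
theorem pv_block_eq (block kl : List Char)
    (hb : ∀ c ∈ block, pvDomChar c = true) (hk : ∀ c ∈ kl, pvDomChar c = true) :
    (block.zip kl).flatMap pvFmtA = pvHexBlock block kl := by
  unfold pvHexBlock
  rw [pv_join_nil_flatten, List.flatMap_def]
  congr 1
  apply List.map_congr_left
  intro p hp
  obtain ⟨h1, h2⟩ := List.of_mem_zip hp
  have b1 := pv_dom_lt _ (hb _ h1)
  have b2 := pv_dom_lt _ (hk _ h2)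
  have hv8 : p.1.toNat ^^^ p.2.toNat < 2 ^ 8 :=
    Nat.xor_lt_two_pow (show p.1.toNat < 2 ^ 8 by omega) (show p.2.toNat < 2 ^ 8 by omega)
  have hv : p.1.toNat ^^^ p.2.toNat < 256 := by simpa using hv8
  unfold pvFmtA
  rw [pv_fmt_eq _ hv, PySem.List.pyGetD_natCast, PySem.List.pyGetD_natCast]

-- the main induction: A's zip-with-complete-key pass equals B's block loop
theorem pv_main (kl : List Char) (hn : 0 < kl.length)
    (hk : ∀ c ∈ kl, pvDomChar c = true) :
    ∀ (fuel : Nat) (tl : List Char), tl.length ≤ fuel →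
    (∀ c ∈ tl, pvDomChar c = true) →
    (tl.zip (pvCK kl tl)).flatMap pvFmtA
      = (pvAltGo kl fuel tl).flatten := by
  intro fuel
  induction fuel with
  | zero =>
    intro tl hf _ht
    cases tl with
    | nil => simp [pvAltGo]
    | cons c rest => simp at hf
  | succ m ih =>
    intro tl hf ht
    cases tl with
    | nil => simp [pvAltGo]
    | cons c rest =>
      rw [pv_zip_split kl (c :: rest) hn, List.flatMap_append]
      simp only [pvAltGo, List.flatten_cons]
      congr 1
      · exact pv_block_eq _ kl (fun x hx => ht x (List.mem_of_mem_take hx)) hk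
      · apply ih
        · have : ((c :: rest).drop kl.length).length = (c :: rest).length - kl.length := by
            simp
          simp only [this, List.length_cons] at *
          omega
        · exact fun x hx => ht x (List.mem_of_mem_drop hx)

-- ===== VERDICT (by name: the statement is the Claim_ definition above) =====
theorem xor_text_with_key_spec : Claim_equal_xor_text_with_key := by
  intro text key hdom hpre
  simp only [Spec_xor_text_with_key, xor_text_with_key, xor_text_with_key_alt]
  have hn : 0 < key.toList.length := List.length_pos_of_ne_nil hpre
  simp only [Dom_xor_text_with_key, pvDomStr, Bool.and_eq_true, List.all_eq_true] at hdom
  -- A's if always collapses to the padded complete key pvCK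
  have hck : (if ((List.replicate (text.toList.length / key.toList.length) key.toList).flatten).length ≠ text.toList.length
              then (List.replicate (text.toList.length / key.toList.length) key.toList).flatten
                    ++ key.toList.take (text.toList.length % key.toList.length)
              else (List.replicate (text.toList.length / key.toList.length) key.toList).flatten)
      = pvCK key.toList text.toList := by
    unfold pvCK
    by_cases h : ((List.replicate (text.toList.length / key.toList.length) key.toList).flatten).length ≠ text.toList.length
    · rw [if_pos h]
    · push_neg at h
      have h1 : text.toList.length / key.toList.length * key.toList.length = text.toList.length := by
        simpa [List.length_flatten] using h
      have h0 : text.toList.length % key.toList.length = 0 := by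
        rw [mul_comm] at h1
        have hdm := Nat.div_add_mod text.toList.length key.toList.length
        omega
      rw [if_neg (not_ne_iff.mpr h), h0, List.take_zero, List.append_nil]
  rw [pv_join_nil_flatten, hck, PySem.List.foldl_append_eq_flatMap, List.nil_append]
  exact congrArg String.mk
    (pv_main key.toList hn hdom.2 text.toList.length text.toList le_rfl hdom.1)
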